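-- pv_equiv track=rewrite | github.com/wowns1484/Algorithm | Programmers/Level1/[1차] 비밀지도.py | solution
-- ===== SOURCE A (Python) =====
-- def d_to_b(d, n):
--     b = []
--
--     idx = 0
--     while(n > idx):
--         b.append(d%2)
--         d //= 2
--         idx += 1
--
--     b.reverse()
--
--     return b
--
-- def solution(n, arr1, arr2):
--     answer = []
--
--     for n1, n2 in zip(arr1, arr2):
--         cols = ""
--
--         b1 = d_to_b(n1, n)
--         b2 = d_to_b(n2, n)
--         b = [a+b for a, b in zip(b1, b2)]
--
--         for elem in b:
--             if elem >= 1: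
--                 cols += "#"
--             else:
--                 cols += " "
--
--         answer.append(cols)
--
--     return answer
-- ===== SOURCE B (Python) =====
-- def solution(n, arr1, arr2):
--     return [
--         ''.join('#' if (a | b) >> i & 1 else ' ' for i in range(n - 1, -1, -1))
--         for a, b in zip(arr1, arr2)
--     ]
-- ===== Notes on version B (the rewrite author's own statement) =====
-- stated objective: alternative
-- what changed: Replaces per-number bit-list extraction (two while loops, reverse, zip and per-position sum) by a single bitwise OR of each pair followed by direct bit tests (v >> i & 1) while joining the characters, building no intermediate lists.
import Mathlib
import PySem

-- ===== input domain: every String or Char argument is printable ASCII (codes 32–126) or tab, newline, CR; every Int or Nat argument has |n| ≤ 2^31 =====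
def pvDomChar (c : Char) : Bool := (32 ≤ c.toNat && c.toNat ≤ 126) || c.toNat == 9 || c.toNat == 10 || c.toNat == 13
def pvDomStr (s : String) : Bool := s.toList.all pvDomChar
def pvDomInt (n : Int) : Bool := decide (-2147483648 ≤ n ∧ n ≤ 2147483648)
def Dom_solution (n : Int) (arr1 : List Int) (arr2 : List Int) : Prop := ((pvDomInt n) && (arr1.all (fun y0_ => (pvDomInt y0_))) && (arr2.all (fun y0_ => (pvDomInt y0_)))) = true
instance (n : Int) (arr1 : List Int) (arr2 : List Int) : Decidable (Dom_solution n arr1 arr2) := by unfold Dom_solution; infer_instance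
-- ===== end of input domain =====

-- B replaces A's per-number bit-list extraction with one bitwise OR per pair and direct bit
-- tests while joining the characters (objective: alternative, same asymptotic cost).

-- ===== PORT A =====
-- the while loop of d_to_b: state (d, b), counter idx, runs while n > idx
def dToBGo (d n idx : Int) (b : List Int) : List Int :=
  if n > idx then dToBGo (PySem.Int.floordiv d 2) n (idx + 1) (b ++ [PySem.Int.mod d 2]) else b
termination_by (n - idx).toNat
decreasing_by omega

def d_to_b (d n : Int) : List Int := (dToBGo d n 0 []).reverse

def solution (n : Int) (arr1 : List Int) (arr2 : List Int) : List String :=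
  (arr1.zip arr2).foldl (fun answer p =>
    let b1 := d_to_b p.1 n
    let b2 := d_to_b p.2 n
    let b := (b1.zip b2).map (fun q => q.1 + q.2)
    let cols := b.foldl (fun cols elem => cols ++ (if elem ≥ 1 then "#" else " ")) ""
    answer ++ [cols]) []

-- ===== PORT B =====
-- ''.join over a generator of single characters is String.ofList; every i produced by
-- range(n-1, -1, -1) satisfies 0 ≤ i, so Python's 'v >> i' is '>>> i.toNat' exactly;
-- Python's truthiness of '(v >> i) & 1' is '≠ 0'.
def solution_alt (n : Int) (arr1 : List Int) (arr2 : List Int) : List String :=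
  (arr1.zip arr2).map (fun p =>
    String.ofList ((PySem.List.pyRange (n - 1) (-1) (-1)).map (fun i =>
      if PySem.Int.band (PySem.Int.bor p.1 p.2 >>> i.toNat) 1 ≠ 0 then '#' else ' ')))

-- ===== PRECONDITION & SPEC =====
def Spec_solution (n : Int) (arr1 : List Int) (arr2 : List Int) (out : List String) : Prop := out = solution_alt n arr1 arr2
instance (n : Int) (arr1 : List Int) (arr2 : List Int) (out : List String) : Decidable (Spec_solution n arr1 arr2 out) := by unfold Spec_solution; infer_instance

-- ===== CLAIM (what is proved, stated in full; the proofs are below) =====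
def Claim_equal_solution : Prop := ∀ (n : Int) (arr1 : List Int) (arr2 : List Int), Dom_solution n arr1 arr2 → Spec_solution n arr1 arr2 (solution n arr1 arr2)

-- ===== LEMMAS AND PROOFS =====

-- (m &&& n) and m ^^^ (m &&& n) split m into disjoint bit sets, so they add up to m
theorem pv_and_add_xor (m : Nat) : ∀ n : Nat, (m &&& n) + (m ^^^ (m &&& n)) = m := by
  induction m using Nat.strong_induction_on with
  | _ m ih =>
    intro n
    rcases Nat.eq_zero_or_pos m with h | h
    · subst h; simp
    · have hA2 : (m &&& n) / 2 = (m / 2) &&& (n / 2) := Nat.and_div_two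
      have hX2 : (m ^^^ (m &&& n)) / 2 = (m / 2) ^^^ ((m &&& n) / 2) := Nat.xor_div_two
      have hdiv : (m &&& n) / 2 + (m ^^^ (m &&& n)) / 2 = m / 2 := by
        rw [hA2, hX2, hA2]; exact ih (m / 2) (by omega) (n / 2)
      have h1 := Nat.testBit_and m n 0
      have h2 := Nat.testBit_xor m (m &&& n) 0
      simp only [Nat.testBit_zero] at h1 h2
      have em : (m &&& n) % 2 + (m ^^^ (m &&& n)) % 2 = m % 2 := by
        rcases Nat.mod_two_eq_zero_or_one m with hm | hm <;>
        rcases Nat.mod_two_eq_zero_or_one n with hn | hn <;>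
        rcases Nat.mod_two_eq_zero_or_one (m &&& n) with hA | hA <;>
        rcases Nat.mod_two_eq_zero_or_one (m ^^^ (m &&& n)) with hX | hX <;>
          simp [hm, hn, hA, hX] at h1 h2 ⊢
      omega

theorem pv_sub_and (m n : Nat) : m - (m &&& n) = m ^^^ (m &&& n) := by
  have := pv_and_add_xor m n; omega

theorem pv_negsub (x : Nat) : (-(x : Int) - 1) = Int.negSucc x := by
  rw [Int.negSucc_eq]; ring

theorem pv_tb_neg (x : Nat) (k : Nat) : (Int.negSucc x).testBit k = !(x.testBit k) := rfl

theorem pv_tb_pos (x : Nat) (k : Nat) : (Int.ofNat x).testBit k = x.testBit k := rfl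

-- bits of PySem's Python-exact OR
theorem pv_bor_testBit (a b : Int) (k : Nat) :
    (PySem.Int.bor a b).testBit k = (a.testBit k || b.testBit k) := by
  cases a with
  | ofNat m =>
    cases b with
    | ofNat n =>
      simp [PySem.Int.bor, Int.testBit, Nat.testBit_or]
    | negSucc n =>
      have hneg : ¬ (0 : Int) ≤ Int.negSucc n := by omega
      have hn : (-(Int.negSucc n) - 1).toNat = n := by rw [Int.negSucc_eq]; omega
      have hm : (Int.ofNat m).toNat = m := rfl
      simp only [PySem.Int.bor, if_neg hneg, hn, hm]
      have h0 : (0:ℤ) ≤ Int.ofNat m := Int.natCast_nonneg m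
      rw [if_pos h0, pv_negsub, pv_tb_neg, pv_tb_pos, pv_tb_neg, pv_sub_and,
        Nat.testBit_xor, Nat.testBit_and]
      cases m.testBit k <;> cases n.testBit k <;> rfl
  | negSucc m =>
    have hnegm : ¬ (0 : Int) ≤ Int.negSucc m := by omega
    have hmm : (-(Int.negSucc m) - 1).toNat = m := by rw [Int.negSucc_eq]; omega
    cases b with
    | ofNat n =>
      have hn : (Int.ofNat n).toNat = n := rfl
      simp only [PySem.Int.bor, if_neg hnegm, hmm, hn]
      have h0 : (0:ℤ) ≤ Int.ofNat n := Int.natCast_nonneg n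
      rw [if_pos h0, pv_negsub, pv_tb_neg, pv_tb_neg, pv_tb_pos, pv_sub_and,
        Nat.testBit_xor, Nat.testBit_and]
      cases m.testBit k <;> cases n.testBit k <;> rfl
    | negSucc n =>
      have hnegn : ¬ (0 : Int) ≤ Int.negSucc n := by omega
      have hn : (-(Int.negSucc n) - 1).toNat = n := by rw [Int.negSucc_eq]; omega
      simp only [PySem.Int.bor, if_neg hnegm, if_neg hnegn, hmm, hn]
      rw [pv_negsub, pv_tb_neg, pv_tb_neg, pv_tb_neg, Nat.testBit_and]
      cases m.testBit k <;> cases n.testBit k <;> rfl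

-- x % 2 reads bit 0
theorem pv_mod_two_testBit (x : Int) : PySem.Int.mod x 2 = if x.testBit 0 then 1 else 0 := by
  have hfm : PySem.Int.mod x 2 = x % 2 := by
    show x.fmod 2 = x % 2
    rw [Int.fmod_eq_emod, if_pos (Or.inl (by norm_num))]; ring
  rw [hfm]
  cases x with
  | ofNat m =>
    rw [pv_tb_pos, Nat.testBit_zero]
    rcases Nat.mod_two_eq_zero_or_one m with h | h <;> simp [h] <;> omega
  | negSucc m =>
    rw [pv_tb_neg, Nat.testBit_zero, Int.negSucc_eq]
    rcases Nat.mod_two_eq_zero_or_one m with h | h <;> simp [h] <;> omega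

theorem pv_shift_testBit (x : Int) (k : Nat) : (x >>> k).testBit 0 = x.testBit k := by
  cases x with
  | ofNat m =>
    show (Int.ofNat (m >>> k)).testBit 0 = (Int.ofNat m).testBit k
    rw [pv_tb_pos, pv_tb_pos, Nat.testBit_shiftRight]; rfl
  | negSucc m =>
    show (Int.negSucc (m >>> k)).testBit 0 = (Int.negSucc m).testBit k
    rw [pv_tb_neg, pv_tb_neg, Nat.testBit_shiftRight]; rfl

theorem pv_mod_two_shift (x : Int) (k : Nat) :
    PySem.Int.mod (x >>> k) 2 = if x.testBit k then 1 else 0 := by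
  rw [pv_mod_two_testBit, pv_shift_testBit]

theorem pv_floordiv_two (x : Int) : PySem.Int.floordiv x 2 = x >>> (1 : Nat) := by
  have hfd : PySem.Int.floordiv x 2 = x / 2 := by
    show x.fdiv 2 = x / 2
    rw [Int.fdiv_eq_ediv, if_pos (Or.inl (by norm_num))]; ring
  rw [hfd]
  cases x with
  | ofNat m =>
    show Int.ofNat m / 2 = Int.ofNat (m >>> 1)
    have h1 : m >>> 1 = m / 2 := by
      rw [Nat.shiftRight_succ, Nat.shiftRight_zero]
    have e1 : Int.ofNat (m / 2) = ((m / 2 : Nat) : Int) := rfl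
    have e2 : Int.ofNat m = (m : Int) := rfl
    rw [h1, e1, e2]; omega
  | negSucc m =>
    show Int.negSucc m / 2 = Int.negSucc (m >>> 1)
    have h1 : m >>> 1 = m / 2 := by
      rw [Nat.shiftRight_succ, Nat.shiftRight_zero]
    rw [h1, Int.negSucc_eq, Int.negSucc_eq]; omega

theorem pv_shift_one_shift (x : Int) (k : Nat) : (x >>> (1 : Nat)) >>> k = x >>> (k + 1) := by
  cases x with
  | ofNat m =>
    show Int.ofNat (m >>> 1 >>> k) = Int.ofNat (m >>> (k + 1))
    rw [← Nat.shiftRight_add, Nat.add_comm]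
  | negSucc m =>
    show Int.negSucc (m >>> 1 >>> k) = Int.negSucc (m >>> (k + 1))
    rw [← Nat.shiftRight_add, Nat.add_comm]

theorem pv_shift_zero (x : Int) : x >>> (0 : Nat) = x := by
  cases x <;> rfl

theorem pv_dToBGo_eq (t : Nat) : ∀ (d n idx : Int) (b : List Int), (n - idx).toNat = t →
    dToBGo d n idx b = b ++ (List.range t).map (fun k : Nat => PySem.Int.mod (d >>> k) 2) := by
  induction t with
  | zero =>
    intro d n idx b h
    rw [dToBGo]; have hle : ¬ n > idx := by omega
    simp [hle]
  | succ j ih =>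
    intro d n idx b h
    rw [dToBGo]; have hgt : n > idx := by omega
    rw [if_pos hgt, ih _ n (idx + 1) _ (by omega)]
    rw [List.append_assoc]
    congr 1
    rw [List.range_succ_eq_map, List.map_cons, List.map_map, List.singleton_append]
    congr 1
    · rw [pv_shift_zero]
    · apply List.map_congr_left
      intro k _
      show PySem.Int.mod (PySem.Int.floordiv d 2 >>> k) 2 = PySem.Int.mod (d >>> (k + 1)) 2
      rw [pv_floordiv_two, pv_shift_one_shift]

theorem pv_d_to_b_eq (d n : Int) :
    d_to_b d n = ((List.range n.toNat).map (fun k : Nat => PySem.Int.mod (d >>> k) 2)).reverse := by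
  unfold d_to_b
  rw [pv_dToBGo_eq n.toNat d n 0 [] (by omega)]
  simp

theorem pv_str_one (e : Int) :
    (if e ≥ 1 then "#" else " ") = String.ofList [if e ≥ 1 then '#' else ' '] := by
  split_ifs <;> rfl

theorem pv_foldl_str (l : List Int) : ∀ s : String,
    l.foldl (fun cols elem => cols ++ (if elem ≥ 1 then "#" else " ")) s
      = s ++ String.ofList (l.map (fun e => if e ≥ 1 then '#' else ' ')) := by
  induction l with
  | nil => intro s; simp
  | cons e l ih =>
    intro s
    rw [List.foldl_cons, ih, List.map_cons, pv_str_one, String.append_assoc,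
      ← String.ofList_append, List.singleton_append]

theorem pv_foldl_app (f : Int × Int → String) (l : List (Int × Int)) : ∀ acc : List String,
    l.foldl (fun ans p => ans ++ [f p]) acc = acc ++ l.map f := by
  induction l with
  | nil => intro acc; simp
  | cons p l ih => intro acc; simp [ih]

theorem pv_shiftRight_cast (x : Int) (k : Nat) : x >>> ((k : Int)) = x >>> k := by
  cases x <;> cases k <;> rfl

-- the two conditions pick the same character at bit k
theorem pv_cond_eq (a b : Int) (k : Nat) :
    ((if PySem.Int.mod (a >>> k) 2 + PySem.Int.mod (b >>> k) 2 ≥ 1 then '#' else ' ')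
      = (if PySem.Int.band (PySem.Int.bor a b >>> k) 1 ≠ 0 then '#' else ' ')) := by
  rw [PySem.Int.band_one, pv_mod_two_shift, pv_mod_two_shift, pv_mod_two_shift, pv_bor_testBit]
  cases a.testBit k <;> cases b.testBit k <;> simp

-- one row: A's per-bit list pipeline equals B's joined bit tests
theorem pv_row_eq (n a b : Int) :
    (((d_to_b a n).zip (d_to_b b n)).map (fun q => q.1 + q.2)).foldl
        (fun cols elem => cols ++ (if elem ≥ 1 then "#" else " ")) ""
      = String.ofList ((PySem.List.pyRange (n - 1) (-1) (-1)).map (fun i =>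
          if PySem.Int.band (PySem.Int.bor a b >>> i.toNat) 1 ≠ 0 then '#' else ' ')) := by
  rw [pv_foldl_str]
  rw [String.empty_append]
  congr 1
  rw [pv_d_to_b_eq, pv_d_to_b_eq, ← List.map_reverse, ← List.map_reverse, List.zip_map',
    List.map_map, List.map_map]
  rw [PySem.List.pyRange_neg_one, List.map_map]
  have hN : ((n - 1) - (-1)).toNat = n.toNat := by omega
  rw [hN]
  apply List.ext_getElem
  · simp
  · intro i h1 h2
    simp only [List.getElem_map, List.getElem_reverse, List.length_range,
      List.getElem_range, Function.comp]
    have hiN : i < n.toNat := by simpa using h1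
    have htn : (n - 1 - (i : Int)).toNat = n.toNat - 1 - i := by omega
    rw [htn, pv_shiftRight_cast]
    exact pv_cond_eq a b (n.toNat - 1 - i)

-- ===== VERDICT (by name: the statement is the Claim_ definition above) =====
theorem solution_spec : Claim_equal_solution := by
  intro n arr1 arr2 _
  show solution n arr1 arr2 = solution_alt n arr1 arr2
  unfold solution solution_alt
  rw [pv_foldl_app]
  rw [List.nil_append]
  apply List.map_congr_left
  intro p _
  exact pv_row_eq n p.1 p.2
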